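-- pv_equiv track=rewrite | github.com/yyoonsahng/DevSix | Week5/Q30/seoyoung.py | countMatchedWord
-- ===== SOURCE A (Python) =====
-- def isMatched(word, query):
--     if len(word) != len(query):
--         return False
--     for i in range(len(query)):
--         if query[i] == '?':
--             continue
--         if word[i] != query[i]:
--             return False
--     return True
--
-- def countMatchedWord(index, query, words):
--     count = 0
--     if isMatched(words[index], query):
--         count += 1
--     left = index - 1
--     right = index + 1
--     while left != -1 or right != -1:
--         if left < 0 or len(words[left]) != len(query):
--             left = -1
--         if right >= len(words) or len(words[right]) != len(query):
--             right = -1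
--         if left != -1:
--             if isMatched(words[left], query):
--                 count += 1
--             left -= 1
--         if right != -1:
--             if isMatched(words[right], query):
--                 count += 1
--             right += 1
--     return count
-- ===== SOURCE B (Python) =====
-- def isMatched(word, query):
--     if len(word) != len(query):
--         return False
--     for i in range(len(query)):
--         if query[i] == '?':
--             continue
--         if word[i] != query[i]:
--             return False
--     return True
--
-- def countMatchedWord(index, query, words):
--     L = len(query)
--     good = [len(w) == L for w in words]
--     bad_prefix = [0]
--     b = 0
--     for g in good:
--         b += 0 if g else 1
--         bad_prefix.append(b)
--     total = 1 if isMatched(words[index], query) else 0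
--     for i, w in enumerate(words):
--         if i == index:
--             continue
--         if i < index:
--             inblock = good[i] and bad_prefix[index] == bad_prefix[i + 1]
--         else:
--             inblock = good[i] and bad_prefix[i] == bad_prefix[index + 1]
--         if inblock and isMatched(w, query):
--             total += 1
--     return total
-- ===== Notes on version B (the rewrite author's own statement) =====
-- stated objective: alternative
-- what changed: Replaces A's outward two-pointer expansion from index by a single global pass: B precomputes a prefix-count array of wrong-length words and then counts, over all positions, those whose whole gap to index is free of wrong-length words; Pre_ excludes out-of-range indices, on which A raises IndexError, and in-range indices <= -2, on which A's value is an accident of Python negative-index wraparound (index = -1 is kept: both programs wrap to the last word and provably agree).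
-- outside the precondition, e.g. on countMatchedWord(-2, '??', ['ab', 'cd', 'ef']): A returns 1, B returns 4
import Mathlib
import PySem

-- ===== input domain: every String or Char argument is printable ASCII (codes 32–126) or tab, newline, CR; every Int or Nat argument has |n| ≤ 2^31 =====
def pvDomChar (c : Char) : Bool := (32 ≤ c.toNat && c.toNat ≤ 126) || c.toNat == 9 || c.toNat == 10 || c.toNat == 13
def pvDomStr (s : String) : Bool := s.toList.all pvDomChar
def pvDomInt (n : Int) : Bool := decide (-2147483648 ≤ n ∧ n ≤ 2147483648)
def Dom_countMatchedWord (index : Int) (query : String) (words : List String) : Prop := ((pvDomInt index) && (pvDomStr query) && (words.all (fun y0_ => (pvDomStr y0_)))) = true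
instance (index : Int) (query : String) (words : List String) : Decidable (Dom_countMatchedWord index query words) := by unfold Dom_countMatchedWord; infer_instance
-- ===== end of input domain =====

-- B replaces A's outward two-pointer expansion from `index` by a single global pass: it precomputes a
-- prefix-count array of wrong-length words and counts, over ALL positions, those whose whole gap to
-- `index` is free of wrong-length words (objective: alternative; same asymptotic cost).
-- The `fuel : Nat` arguments in port A are totality guards only: each loop gets enough fuel to run exactly as its Python does.

-- shared subscript words[i] (Python negative-index wraparound via pyGetD; the "" default is unreachable inside Pre_)
def pvWordAt (words : List String) (i : Int) : String := PySem.List.pyGetD words i ""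

-- shared helper isMatched (identical in Source A and Source B)
def pvIsMatchedGo (w q : List Char) : List Int → Bool
  | [] => true
  | i :: rest =>
    match PySem.List.pyGet? q i, PySem.List.pyGet? w i with
    | some qc, some wc =>
      if qc = '?' then pvIsMatchedGo w q rest
      else if wc ≠ qc then false
      else pvIsMatchedGo w q rest
    | _, _ => false   -- unreachable: i ∈ range(len(query)) and len(word) = len(query)

def isMatchedPort (word query : String) : Bool :=
  if PySem.Str.len word ≠ PySem.Str.len query then false
  else pvIsMatchedGo word.toList query.toList (PySem.List.pyRange 0 (PySem.Str.len query) 1)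

-- ===== PORT A =====
-- A's while-loop over (left, right, count) with -1 sentinels
def pvLoopA (query : String) (words : List String) (fuel : Nat) (left right count : Int) : Int :=
  match fuel with
  | 0 => count   -- unreachable: the initial fuel bounds the number of iterations
  | fuel + 1 =>
    if left = -1 ∧ right = -1 then count
    else
      let l := if left < 0 ∨ PySem.Str.len (pvWordAt words left) ≠ PySem.Str.len query then -1 else left
      let r := if right ≥ (words.length : Int) ∨ PySem.Str.len (pvWordAt words right) ≠ PySem.Str.len query then -1 else right
      let c1 := if l ≠ -1 then (if isMatchedPort (pvWordAt words l) query then count + 1 else count) else count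
      let l' := if l ≠ -1 then l - 1 else l
      let c2 := if r ≠ -1 then (if isMatchedPort (pvWordAt words r) query then c1 + 1 else c1) else c1
      let r' := if r ≠ -1 then r + 1 else r
      pvLoopA query words fuel l' r' c2

def countMatchedWord (index : Int) (query : String) (words : List String) : Int :=
  let count : Int := if isMatchedPort (pvWordAt words index) query then 1 else 0
  pvLoopA query words ((index + 1).toNat + ((words.length : Int) - index).toNat + 2) (index - 1) (index + 1) count

-- ===== PORT B =====
-- good = [len(w) == L for w in words]
def pvGoodList (query : String) (words : List String) : List Bool :=
  words.map (fun w => PySem.Str.len w == PySem.Str.len query)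

-- `for g in good: b += 0 if g else 1; bad_prefix.append(b)` — the appended tail of bad_prefix
def pvBPGo (b : Int) : List Bool → List Int
  | [] => []
  | g :: rest =>
    let b' := b + (if g then 0 else 1)
    b' :: pvBPGo b' rest

-- list subscripts good[i] / bad_prefix[i] (always in range where B's code reaches them; default unreachable)
def pvIdxB (good : List Bool) (i : Int) : Bool := PySem.List.pyGetD good i false
def pvIdxI (bp : List Int) (i : Int) : Int := PySem.List.pyGetD bp i 0

-- `for i, w in enumerate(words)` accumulating total
def pvBLoop (index : Int) (query : String) (good : List Bool) (bp : List Int) :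
    List (Int × String) → Int → Int
  | [], total => total
  | (i, w) :: rest, total =>
    if i = index then pvBLoop index query good bp rest total
    else
      let inblock :=
        if i < index then pvIdxB good i && (pvIdxI bp index == pvIdxI bp (i + 1))
        else pvIdxB good i && (pvIdxI bp i == pvIdxI bp (index + 1))
      if inblock && isMatchedPort w query then pvBLoop index query good bp rest (total + 1)
      else pvBLoop index query good bp rest total

def countMatchedWord_alt (index : Int) (query : String) (words : List String) : Int :=
  let good := pvGoodList query words
  let bp := (0 : Int) :: pvBPGo 0 good
  let total : Int := if isMatchedPort (pvWordAt words index) query then 1 else 0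
  pvBLoop index query good bp (PySem.List.enumerate words) total

-- ===== PRECONDITION & SPEC =====
-- Pre_ excludes out-of-range indices, on which A raises IndexError, and in-range indices ≤ -2, on which
-- A's value is an accident of Python negative-index wraparound (index = -1 is kept: both programs wrap
-- to the last word and provably agree).
def Pre_countMatchedWord (index : Int) (query : String) (words : List String) : Prop :=
  -1 ≤ index ∧ index < (words.length : Int) ∧ words ≠ []
instance (index : Int) (query : String) (words : List String) : Decidable (Pre_countMatchedWord index query words) := by unfold Pre_countMatchedWord; infer_instance

def pvWitness_countMatchedWord : Int × String × List String := (0, "a?", ["ab", "cd"])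

def Spec_countMatchedWord (index : Int) (query : String) (words : List String) (out : Int) : Prop := out = countMatchedWord_alt index query words
instance (index : Int) (query : String) (words : List String) (out : Int) : Decidable (Spec_countMatchedWord index query words out) := by unfold Spec_countMatchedWord; infer_instance

-- ===== CLAIM (what is proved, stated in full; the proofs are below) =====
def Claim_equal_countMatchedWord : Prop := ∀ (index : Int) (query : String) (words : List String), Dom_countMatchedWord index query words → Pre_countMatchedWord index query words → Spec_countMatchedWord index query words (countMatchedWord index query words)

-- ===== LEMMAS AND PROOFS =====

-- ---------- A-side characterisation: the loop's value as left + right contributions ----------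

-- total contribution of A's left pointer started at x
def pvCl (query : String) (words : List String) (x : Int) : Int :=
  if x < 0 ∨ PySem.Str.len (pvWordAt words x) ≠ PySem.Str.len query then 0
  else (if isMatchedPort (pvWordAt words x) query then 1 else 0) + pvCl query words (x - 1)
termination_by (x + 1).toNat
decreasing_by omega

-- total contribution of A's right pointer started at x
def pvCr (query : String) (words : List String) (x : Int) : Int :=
  if x = -1 then 0
  else if x ≥ (words.length : Int) ∨ PySem.Str.len (pvWordAt words x) ≠ PySem.Str.len query then 0
  else (if isMatchedPort (pvWordAt words x) query then 1 else 0) + pvCr query words (x + 1)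
termination_by ((words.length : Int) - x).toNat
decreasing_by omega

-- iterations A's loop still needs from state (left, right)
def pvMu (words : List String) (left right : Int) : Nat :=
  (if left = -1 then 0 else (left + 2).toNat + 1) +
    (if right = -1 then 0 else ((words.length : Int) + 1 - right).toNat + 1)

theorem pvCl_zero (query : String) (words : List String) (x : Int)
    (h : x < 0 ∨ PySem.Str.len (pvWordAt words x) ≠ PySem.Str.len query) : pvCl query words x = 0 := by
  rw [pvCl, if_pos h]

theorem pvCl_step (query : String) (words : List String) (x : Int)
    (h : ¬(x < 0 ∨ PySem.Str.len (pvWordAt words x) ≠ PySem.Str.len query)) :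
    pvCl query words x = (if isMatchedPort (pvWordAt words x) query then 1 else 0) + pvCl query words (x - 1) := by
  rw [pvCl, if_neg h]

theorem pvCr_neg_one (query : String) (words : List String) : pvCr query words (-1) = 0 := by
  rw [pvCr, if_pos rfl]

theorem pvCr_zero (query : String) (words : List String) (x : Int) (hx : x ≠ -1)
    (h : x ≥ (words.length : Int) ∨ PySem.Str.len (pvWordAt words x) ≠ PySem.Str.len query) : pvCr query words x = 0 := by
  rw [pvCr, if_neg hx, if_pos h]

theorem pvCr_step (query : String) (words : List String) (x : Int) (hx : x ≠ -1)
    (h : ¬(x ≥ (words.length : Int) ∨ PySem.Str.len (pvWordAt words x) ≠ PySem.Str.len query)) :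
    pvCr query words x = (if isMatchedPort (pvWordAt words x) query then 1 else 0) + pvCr query words (x + 1) := by
  rw [pvCr, if_neg hx, if_neg h]

theorem pvLoopA_eq (query : String) (words : List String) (fuel : Nat) :
    ∀ left right count : Int, pvMu words left right ≤ fuel →
      pvLoopA query words fuel left right count = count + pvCl query words left + pvCr query words right := by
  induction fuel with
  | zero =>
    intro left right count hμ
    have hl : left = -1 := by unfold pvMu at hμ; split_ifs at hμ <;> omega
    have hr : right = -1 := by unfold pvMu at hμ; split_ifs at hμ <;> omega
    subst hl; subst hr
    rw [pvCl_zero query words (-1) (Or.inl (by omega)), pvCr_neg_one]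
    simp [pvLoopA]
  | succ fuel ih =>
    intro left right count hμ
    rw [pvLoopA]
    by_cases h0 : left = -1 ∧ right = -1
    · rw [if_pos h0]
      obtain ⟨hl, hr⟩ := h0
      subst hl; subst hr
      rw [pvCl_zero query words (-1) (Or.inl (by omega)), pvCr_neg_one]
      ring
    · rw [if_neg h0]
      simp only []
      set l : Int := (if left < 0 ∨ PySem.Str.len (pvWordAt words left) ≠ PySem.Str.len query then -1 else left) with hl
      set r : Int := (if right ≥ (words.length : Int) ∨ PySem.Str.len (pvWordAt words right) ≠ PySem.Str.len query then -1 else right) with hr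
      set c1 : Int := (if l ≠ -1 then (if isMatchedPort (pvWordAt words l) query then count + 1 else count) else count) with hc1
      set l' : Int := (if l ≠ -1 then l - 1 else l) with hl'
      set c2 : Int := (if r ≠ -1 then (if isMatchedPort (pvWordAt words r) query then c1 + 1 else c1) else c1) with hc2
      set r' : Int := (if r ≠ -1 then r + 1 else r) with hr'
      clear_value l r c1 l' c2 r'
      by_cases hL : left < 0 ∨ PySem.Str.len (pvWordAt words left) ≠ PySem.Str.len query
      · rw [if_pos hL] at hl
        subst hl
        norm_num at hc1 hl'
        subst hc1
        subst hl'
        by_cases hr1 : right = -1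
        · subst hr1
          have hrv : r = -1 := by rw [hr]; split_ifs <;> rfl
          subst hrv
          norm_num at hc2 hr'
          subst hc2
          subst hr'
          rw [ih (-1) (-1) _ (by unfold pvMu; split_ifs <;> omega)]
          rw [pvCl_zero query words left hL, pvCl_zero query words (-1) (Or.inl (by omega)), pvCr_neg_one]
        · by_cases hR : right ≥ (words.length : Int) ∨ PySem.Str.len (pvWordAt words right) ≠ PySem.Str.len query
          · rw [if_pos hR] at hr
            subst hr
            norm_num at hc2 hr'
            subst hc2
            subst hr'
            rw [ih (-1) (-1) _ (by unfold pvMu; split_ifs <;> omega)]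
            rw [pvCl_zero query words left hL, pvCl_zero query words (-1) (Or.inl (by omega)),
                pvCr_neg_one, pvCr_zero query words right hr1 hR]
          · rw [if_neg hR] at hr
            rw [hr] at hc2 hr'
            rw [if_pos hr1] at hc2 hr'
            subst hc2
            subst hr'
            rw [ih (-1) (right + 1) _ (by
              unfold pvMu at hμ ⊢
              rcases not_or.mp hR with ⟨hR1, _⟩
              split_ifs at hμ ⊢ <;> omega)]
            rw [pvCl_zero query words left hL, pvCl_zero query words (-1) (Or.inl (by omega)),
                pvCr_step query words right hr1 hR]
            split_ifs <;> ring
      · rw [if_neg hL] at hl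
        rw [hl] at hc1 hl'
        have hl0 : 0 ≤ left := by
          rcases not_or.mp hL with ⟨hL1, _⟩
          omega
        have hln : left ≠ -1 := by omega
        rw [if_pos hln] at hc1 hl'
        subst hc1
        subst hl'
        by_cases hr1 : right = -1
        · subst hr1
          have hrv : r = -1 := by rw [hr]; split_ifs <;> rfl
          subst hrv
          norm_num at hc2 hr'
          subst hc2
          subst hr'
          rw [ih (left - 1) (-1) _ (by
            unfold pvMu at hμ ⊢
            split_ifs at hμ ⊢ <;> omega)]
          rw [pvCl_step query words left hL, pvCr_neg_one]
          split_ifs <;> ring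
        · by_cases hR : right ≥ (words.length : Int) ∨ PySem.Str.len (pvWordAt words right) ≠ PySem.Str.len query
          · rw [if_pos hR] at hr
            subst hr
            norm_num at hc2 hr'
            subst hc2
            subst hr'
            rw [ih (left - 1) (-1) _ (by
              unfold pvMu at hμ ⊢
              split_ifs at hμ ⊢ <;> omega)]
            rw [pvCl_step query words left hL, pvCr_neg_one, pvCr_zero query words right hr1 hR]
            split_ifs <;> ring
          · rw [if_neg hR] at hr
            rw [hr] at hc2 hr'
            rw [if_pos hr1] at hc2 hr'
            subst hc2
            subst hr'
            rw [ih (left - 1) (right + 1) _ (by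
              unfold pvMu at hμ ⊢
              rcases not_or.mp hR with ⟨hR1, _⟩
              split_ifs at hμ ⊢ <;> omega)]
            rw [pvCl_step query words left hL, pvCr_step query words right hr1 hR]
            split_ifs <;> ring

-- ---------- generic integer-range sums ----------

def pvSum (a b : Int) (f : Int → Int) : Int := ((PySem.List.pyRange a b 1).map f).sum

theorem pvSum_empty (a b : Int) (f : Int → Int) (h : b ≤ a) : pvSum a b f = 0 := by
  unfold pvSum; rw [PySem.List.pyRange_one_eq_nil h]; rfl

theorem pvSum_append (a m b : Int) (f : Int → Int) (h1 : a ≤ m) (h2 : m ≤ b) :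
    pvSum a b f = pvSum a m f + pvSum m b f := by
  unfold pvSum
  rw [PySem.List.pyRange_one_append a m b h1 h2, List.map_append, List.sum_append]

theorem pvSum_singleton (a : Int) (f : Int → Int) : pvSum a (a + 1) f = f a := by
  unfold pvSum; rw [PySem.List.pyRange_one_singleton]; simp

theorem pvSum_cons (a b : Int) (f : Int → Int) (h : a < b) :
    pvSum a b f = f a + pvSum (a + 1) b f := by
  unfold pvSum; rw [PySem.List.pyRange_one_cons h]; simp

theorem pvSum_succ_right (a b : Int) (f : Int → Int) (h : a ≤ b) :
    pvSum a (b + 1) f = pvSum a b f + f b := by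
  rw [pvSum_append a b (b + 1) f h (by omega), pvSum_singleton]

theorem pvSum_zero (a b : Int) (f : Int → Int) (h : ∀ i, a ≤ i → i < b → f i = 0) :
    pvSum a b f = 0 := by
  unfold pvSum
  rw [List.map_congr_left (g := fun _ => (0 : Int)) (fun i hi => by
    rcases (PySem.List.mem_pyRange_one).mp hi with ⟨h1, h2⟩
    exact h i h1 h2)]
  simp [PySem.List.sum_map_const_int]

-- ---------- bad_prefix characterisation ----------

-- number of wrong-length words among the first k
def pvCB (gs : List Bool) (k : Nat) : Int := (((gs.take k).countP (fun g => !g) : Nat) : Int)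

theorem pvBPGo_get : ∀ (gs : List Bool) (b : Int) (j : Nat), j < gs.length →
    (pvBPGo b gs)[j]? = some (b + pvCB gs (j + 1)) := by
  intro gs
  induction gs with
  | nil => intro b j h; simp at h
  | cons g rest ih =>
    intro b j h
    cases j with
    | zero =>
      unfold pvBPGo pvCB
      cases g <;> simp
    | succ j =>
      unfold pvBPGo
      simp only [List.getElem?_cons_succ]
      rw [ih _ j (by simpa using h)]
      unfold pvCB
      cases g <;> simp [List.countP_cons] <;> push_cast <;> ring

theorem pvBP_at (gs : List Bool) (k : Nat) (h : k ≤ gs.length) :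
    pvIdxI ((0 : Int) :: pvBPGo 0 gs) (k : Int) = pvCB gs k := by
  unfold pvIdxI
  rw [PySem.List.pyGetD_natCast]
  cases k with
  | zero => simp [pvCB]
  | succ k =>
    simp only [List.getD, List.getElem?_cons_succ]
    rw [pvBPGo_get gs 0 k (by omega)]
    simp

theorem pvCB_succ (gs : List Bool) (k : Nat) (h : k < gs.length) :
    pvCB gs (k + 1) = pvCB gs k + (if gs.getD k false then 0 else 1) := by
  unfold pvCB
  rw [List.take_succ, List.countP_append]
  have : gs[k]? = some gs[k] := List.getElem?_eq_getElem h
  rw [List.getD, this]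
  cases hg : gs[k] <;> simp [hg, List.getD, this] <;> push_cast <;> ring

theorem pvCB_mono (gs : List Bool) (a c : Nat) (h : a ≤ c) : pvCB gs a ≤ pvCB gs c := by
  unfold pvCB
  have hsub : List.Sublist (gs.take a) (gs.take c) := by
    rw [show gs.take a = (gs.take c).take a by rw [List.take_take, min_eq_left h]]
    exact List.take_sublist ..
  exact_mod_cast hsub.countP_le

theorem pvBP_eq_iff (gs : List Bool) (a c : Nat) (hac : a ≤ c) (hc : c ≤ gs.length) :
    pvCB gs a = pvCB gs c ↔ ∀ j : Nat, a ≤ j → j < c → gs.getD j false = true := by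
  induction c with
  | zero =>
    constructor
    · intro _ j h1 h2; omega
    · intro _; have ha : a = 0 := by omega
      subst ha; rfl
  | succ m ih =>
    by_cases ham : a = m + 1
    · subst ham
      constructor
      · intro _ j h1 h2; omega
      · intro _; rfl
    · have ham' : a ≤ m := by omega
      have hm : m < gs.length := by omega
      rw [pvCB_succ gs m hm]
      cases hg : gs.getD m false
      · norm_num
        constructor
        · intro he
          exfalso
          have := pvCB_mono gs a m ham'
          omega
        · intro hall
          have := hall m ham' (by omega)
          simp only [List.getD_eq_getElem?_getD] at hg
          rw [hg] at this; cases this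
      · norm_num
        simp only [← List.getD_eq_getElem?_getD]
        rw [ih ham' (by omega)]
        constructor
        · intro hall j h1 h2
          by_cases hj : j = m
          · subst hj; exact hg
          · exact hall j h1 (by omega)
        · intro hall j h1 h2
          exact hall j h1 (by omega)
  
-- ---------- B-side: loop to sum ----------

def pvTerm (index : Int) (query : String) (good : List Bool) (bp : List Int) (i : Int) (w : String) : Int :=
  if i = index then 0
  else
    let inblock :=
      if i < index then pvIdxB good i && (pvIdxI bp index == pvIdxI bp (i + 1))
      else pvIdxB good i && (pvIdxI bp i == pvIdxI bp (index + 1))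
    if inblock && isMatchedPort w query then 1 else 0

theorem pvBLoop_eq_sum (index : Int) (query : String) (good : List Bool) (bp : List Int) :
    ∀ (l : List (Int × String)) (total : Int),
      pvBLoop index query good bp l total =
        total + (l.map (fun p => pvTerm index query good bp p.1 p.2)).sum := by
  intro l
  induction l with
  | nil => intro total; simp [pvBLoop]
  | cons p rest ih =>
    intro total
    obtain ⟨i, w⟩ := p
    rw [pvBLoop]
    by_cases h1 : i = index
    · rw [if_pos h1, ih]
      simp [pvTerm, h1]
    · rw [if_neg h1]
      simp only [List.map_cons, List.sum_cons, pvTerm, if_neg h1]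
      split_ifs with h2 h3 <;> (rw [ih]; simp only [pvTerm]; ring)

theorem pvGood_at (query : String) (words : List String) (k : Nat) (h : k < words.length) :
    pvIdxB (pvGoodList query words) (k : Int) =
      (PySem.Str.len (pvWordAt words (k : Int)) == PySem.Str.len query) := by
  unfold pvIdxB pvGoodList pvWordAt
  rw [PySem.List.pyGetD_natCast, PySem.List.pyGetD_natCast]
  simp [List.getD, List.getElem?_map, List.getElem?_eq_getElem h]

theorem pvGood_getD (query : String) (words : List String) (k : Nat) (h : k < words.length) :
    (pvGoodList query words).getD k false =
      (PySem.Str.len (pvWordAt words (k : Int)) == PySem.Str.len query) := by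
  have := pvGood_at query words k h
  unfold pvIdxB at this
  rw [PySem.List.pyGetD_natCast] at this
  exact this

-- ===== VERDICT helper lemmas (bridges, then left / right sums) =====

theorem pvTerm_self (index : Int) (query : String) (good : List Bool) (bp : List Int) (w : String) :
    pvTerm index query good bp index w = 0 := by
  simp [pvTerm]

theorem pvTerm_lt (index : Int) (query : String) (good : List Bool) (bp : List Int) (i : Int)
    (w : String) (h1 : i ≠ index) (h2 : i < index) :
    pvTerm index query good bp i w =
      if (pvIdxB good i && (pvIdxI bp index == pvIdxI bp (i + 1))) && isMatchedPort w query then 1 else 0 := by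
  simp only [pvTerm, if_neg h1, if_pos h2]

theorem pvTerm_gt (index : Int) (query : String) (good : List Bool) (bp : List Int) (i : Int)
    (w : String) (h1 : i ≠ index) (h2 : ¬ i < index) :
    pvTerm index query good bp i w =
      if (pvIdxB good i && (pvIdxI bp i == pvIdxI bp (index + 1))) && isMatchedPort w query then 1 else 0 := by
  simp only [pvTerm, if_neg h1, if_neg h2]

theorem pvGood_int (query : String) (words : List String) (i : Int)
    (h0 : 0 ≤ i) (h : i < (words.length : Int)) :
    pvIdxB (pvGoodList query words) i =
      (PySem.Str.len (pvWordAt words i) == PySem.Str.len query) := by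
  have hi : i = ((i.toNat : Nat) : Int) := by omega
  rw [hi, pvGood_at query words i.toNat (by omega)]

theorem pvBP_eq_int (query : String) (words : List String) (a c : Int)
    (h0 : 0 ≤ a) (hac : a ≤ c) (hc : c ≤ (words.length : Int)) :
    (pvIdxI ((0 : Int) :: pvBPGo 0 (pvGoodList query words)) a =
       pvIdxI ((0 : Int) :: pvBPGo 0 (pvGoodList query words)) c) ↔
      (∀ j : Int, a ≤ j → j < c → PySem.Str.len (pvWordAt words j) = PySem.Str.len query) := by
  have hlen : (pvGoodList query words).length = words.length := by simp [pvGoodList]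
  have ha : a = ((a.toNat : Nat) : Int) := by omega
  have hcc : c = ((c.toNat : Nat) : Int) := by omega
  rw [ha, hcc, pvBP_at _ a.toNat (by rw [hlen]; omega), pvBP_at _ c.toNat (by rw [hlen]; omega),
    pvBP_eq_iff _ a.toNat c.toNat (by omega) (by rw [hlen]; omega)]
  constructor
  · intro hall j hj1 hj2
    have hj0 : 0 ≤ j := by omega
    have hgd := hall j.toNat (by omega) (by omega)
    rw [pvGood_getD query words j.toNat (by omega),
      show ((j.toNat : Nat) : Int) = j from by omega] at hgd
    exact beq_iff_eq.mp hgd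
  · intro hall k hk1 hk2
    rw [pvGood_getD query words k (by omega)]
    exact beq_iff_eq.mpr (hall (k : Int) (by omega) (by omega))

theorem pvL_sum (index : Int) (query : String) (words : List String)
    (hin : index ≤ (words.length : Int)) :
    ∀ (k : Nat) (x : Int), x + 1 = (k : Int) → -1 ≤ x → x < index →
      (∀ j : Int, x < j → j < index → PySem.Str.len (pvWordAt words j) = PySem.Str.len query) →
      pvSum 0 (x + 1)
        (fun i => pvTerm index query (pvGoodList query words) ((0:Int) :: pvBPGo 0 (pvGoodList query words)) i (pvWordAt words i)) =
      pvCl query words x := by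
  intro k
  induction k with
  | zero =>
    intro x hk h1 h2 hall
    have hx : x = -1 := by omega
    subst hx
    rw [pvSum_empty 0 (-1 + 1) _ (by omega), pvCl_zero query words (-1) (Or.inl (by omega))]
  | succ k ih =>
    intro x hk h1 h2 hall
    have hx0 : 0 ≤ x := by omega
    have hxn : x < (words.length : Int) := by omega
    rw [pvSum_succ_right 0 x _ hx0]
    by_cases hgx : PySem.Str.len (pvWordAt words x) = PySem.Str.len query
    · -- words[x] has the query's length: head of pvCl, recurse
      have hterm : pvTerm index query (pvGoodList query words)
          ((0:Int) :: pvBPGo 0 (pvGoodList query words)) x (pvWordAt words x) =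
          (if isMatchedPort (pvWordAt words x) query then 1 else 0) := by
        rw [pvTerm_lt _ _ _ _ _ _ (by omega) h2]
        rw [pvGood_int query words x hx0 hxn]
        have hbp : pvIdxI ((0:Int) :: pvBPGo 0 (pvGoodList query words)) index =
            pvIdxI ((0:Int) :: pvBPGo 0 (pvGoodList query words)) (x + 1) := by
          exact ((pvBP_eq_int query words (x + 1) index (by omega) (by omega) hin).mpr
            (fun j hj1 hj2 => hall j (by omega) hj2)).symm
        rw [hbp]
        have hgx' : (pvWordAt words x).length = query.length := by simpa using hgx
        simp [hgx']
      have ihx := ih (x - 1) (by omega) (by omega) (by omega)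
        (fun j hj1 hj2 => by
          by_cases hjx : j = x
          · subst hjx; exact hgx
          · exact hall j (by omega) hj2)
      rw [show x - 1 + 1 = x from by ring] at ihx
      rw [hterm, ihx, pvCl_step query words x (by push_neg; exact ⟨by omega, hgx⟩)]
      ring
    · -- words[x] has a different length: everything from 0 to x contributes 0
      rw [pvCl_zero query words x (Or.inr hgx)]
      have h0 : pvSum 0 x (fun i => pvTerm index query (pvGoodList query words)
          ((0:Int) :: pvBPGo 0 (pvGoodList query words)) i (pvWordAt words i)) = 0 := by
        apply pvSum_zero
        intro i hi1 hi2
        rw [pvTerm_lt _ _ _ _ _ _ (by omega) (by omega)]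
        have hbp : ¬ (pvIdxI ((0:Int) :: pvBPGo 0 (pvGoodList query words)) index =
            pvIdxI ((0:Int) :: pvBPGo 0 (pvGoodList query words)) (i + 1)) := by
          intro he
          exact hgx (((pvBP_eq_int query words (i + 1) index (by omega) (by omega) hin).mp
            he.symm) x (by omega) h2)
        simp [beq_eq_false_iff_ne.mpr hbp]
      have hx0' : pvTerm index query (pvGoodList query words)
          ((0:Int) :: pvBPGo 0 (pvGoodList query words)) x (pvWordAt words x) = 0 := by
        rw [pvTerm_lt _ _ _ _ _ _ (by omega) h2]
        rw [pvGood_int query words x hx0 hxn]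
        have hgx' : ¬ (pvWordAt words x).length = query.length := by simpa using hgx
        simp [hgx']
      rw [h0, hx0']
      ring

theorem pvR_sum (index : Int) (query : String) (words : List String)
    (hin : -1 ≤ index) :
    ∀ (k : Nat) (x : Int), ((words.length : Int) - x).toNat = k → index + 1 ≤ x → 0 ≤ x →
      (∀ j : Int, index < j → j < x → PySem.Str.len (pvWordAt words j) = PySem.Str.len query) →
      pvSum x (words.length : Int)
        (fun i => pvTerm index query (pvGoodList query words) ((0:Int) :: pvBPGo 0 (pvGoodList query words)) i (pvWordAt words i)) =
      pvCr query words x := by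
  intro k
  induction k with
  | zero =>
    intro x hk h1 h2 hall
    have hx : (words.length : Int) ≤ x := by omega
    rw [pvSum_empty _ _ _ hx, pvCr_zero query words x (by omega) (Or.inl hx)]
  | succ k ih =>
    intro x hk h1 h2 hall
    have hxn : x < (words.length : Int) := by omega
    rw [pvSum_cons x _ _ hxn]
    by_cases hgx : PySem.Str.len (pvWordAt words x) = PySem.Str.len query
    · have hterm : pvTerm index query (pvGoodList query words)
          ((0:Int) :: pvBPGo 0 (pvGoodList query words)) x (pvWordAt words x) =
          (if isMatchedPort (pvWordAt words x) query then 1 else 0) := by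
        rw [pvTerm_gt _ _ _ _ _ _ (by omega) (by omega)]
        rw [pvGood_int query words x h2 hxn]
        have hbp : pvIdxI ((0:Int) :: pvBPGo 0 (pvGoodList query words)) x =
            pvIdxI ((0:Int) :: pvBPGo 0 (pvGoodList query words)) (index + 1) := by
          exact ((pvBP_eq_int query words (index + 1) x (by omega) h1 (by omega)).mpr
            (fun j hj1 hj2 => hall j (by omega) hj2)).symm
        rw [hbp]
        have hgx' : (pvWordAt words x).length = query.length := by simpa using hgx
        simp [hgx']
      rw [hterm, ih (x + 1) (by omega) (by omega) (by omega)
        (fun j hj1 hj2 => by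
          by_cases hjx : j = x
          · subst hjx; exact hgx
          · exact hall j hj1 (by omega))]
      rw [pvCr_step query words x (by omega) (by push_neg; exact ⟨by omega, hgx⟩)]
    · rw [pvCr_zero query words x (by omega) (Or.inr hgx)]
      have hx0' : pvTerm index query (pvGoodList query words)
          ((0:Int) :: pvBPGo 0 (pvGoodList query words)) x (pvWordAt words x) = 0 := by
        rw [pvTerm_gt _ _ _ _ _ _ (by omega) (by omega)]
        rw [pvGood_int query words x h2 hxn]
        have hgx' : ¬ (pvWordAt words x).length = query.length := by simpa using hgx
        simp [hgx']
      have h0 : pvSum (x + 1) (words.length : Int) (fun i => pvTerm index query (pvGoodList query words)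
          ((0:Int) :: pvBPGo 0 (pvGoodList query words)) i (pvWordAt words i)) = 0 := by
        apply pvSum_zero
        intro i hi1 hi2
        rw [pvTerm_gt _ _ _ _ _ _ (by omega) (by omega)]
        have hbp : ¬ (pvIdxI ((0:Int) :: pvBPGo 0 (pvGoodList query words)) i =
            pvIdxI ((0:Int) :: pvBPGo 0 (pvGoodList query words)) (index + 1)) := by
          intro he
          exact hgx (((pvBP_eq_int query words (index + 1) i (by omega) (by omega) (by omega)).mp
            he.symm) x (by omega) (by omega))
        simp [beq_eq_false_iff_ne.mpr hbp]
      rw [h0, hx0']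
      ring

-- ===== VERDICT (by name: the statement is the Claim_ definition above) =====
theorem countMatchedWord_spec : Claim_equal_countMatchedWord := by
  intro index query words _ hpre
  obtain ⟨h1, h2, h3⟩ := hpre
  show countMatchedWord index query words = countMatchedWord_alt index query words
  have hA : countMatchedWord index query words =
      (if isMatchedPort (pvWordAt words index) query then (1:Int) else 0) +
        pvCl query words (index - 1) + pvCr query words (index + 1) := by
    simp only [countMatchedWord]
    rw [pvLoopA_eq query words _ (index - 1) (index + 1) _ (by unfold pvMu; split_ifs <;> omega)]
  have hB : countMatchedWord_alt index query words =
      (if isMatchedPort (pvWordAt words index) query then (1:Int) else 0) +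
        pvSum 0 (words.length : Int)
          (fun i => pvTerm index query (pvGoodList query words) ((0:Int) :: pvBPGo 0 (pvGoodList query words)) i (pvWordAt words i)) := by
    simp only [countMatchedWord_alt]
    rw [pvBLoop_eq_sum, PySem.List.enumerate_eq_map_pyRange words "", List.map_map]
    rfl
  rw [hA, hB]
  by_cases hidx : 0 ≤ index
  · have hL := pvL_sum index query words (by omega) index.toNat (index - 1) (by omega) (by omega)
      (by omega) (fun j hj1 hj2 => absurd hj2 (by omega))
    rw [show index - 1 + 1 = index from by ring] at hL
    have hR := pvR_sum index query words (by omega) ((words.length : Int) - (index + 1)).toNat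
      (index + 1) rfl (by omega) (by omega) (fun j hj1 hj2 => absurd hj2 (by omega))
    rw [pvSum_append 0 index (words.length : Int) _ hidx (by omega),
      pvSum_cons index (words.length : Int) _ h2, hL, hR, pvTerm_self]
    ring
  · have hm1 : index = -1 := by omega
    subst hm1
    have hR := pvR_sum (-1) query words (by omega) ((words.length : Int) - 0).toNat 0 rfl
      (by omega) (by omega) (fun j hj1 hj2 => absurd hj2 (by omega))
    rw [show (-1 : Int) + 1 = 0 from by norm_num,
      pvCl_zero query words (-1 - 1) (Or.inl (by omega)), hR]
    ring
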